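-- pv_equiv track=rewrite | github.com/wondmD/A2SV | C_XOR_distance.py | xor_distance
-- ===== SOURCE A (Python) =====
-- def xor_distance(a, b, r):
--     # XOR operation between a and b
--     xor_result = a ^ b
--
--     # Find the highest bit in r
--     highest_bit = 1
--     while highest_bit <= r:
--         highest_bit <<= 1
--
--     # If the XOR result has a higher bit than r, set all lower bits to 1
--     if xor_result >= highest_bit:
--         xor_result |= (highest_bit - 1)
--
--     # Otherwise, set the highest bit to 1
--     else:
--         xor_result |= highest_bit
--
--     return xor_result
-- ===== SOURCE B (Python) =====
-- def xor_distance(a, b, r):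
--     xor_result = a ^ b
--     # smallest power of two strictly greater than r (1 when r <= 0), in closed form
--     highest_bit = (1 << r.bit_length()) if r > 0 else 1
--     if xor_result >= highest_bit:
--         return xor_result | (highest_bit - 1)
--     return xor_result | highest_bit
-- ===== Notes on version B (the rewrite author's own statement) =====
-- stated objective: simpler
-- what changed: Replaces the doubling while-loop that searches for the smallest power of two above r with the closed form (1 << r.bit_length()) when r > 0 (and 1 otherwise), keeping the final branch unchanged.
import Mathlib
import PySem

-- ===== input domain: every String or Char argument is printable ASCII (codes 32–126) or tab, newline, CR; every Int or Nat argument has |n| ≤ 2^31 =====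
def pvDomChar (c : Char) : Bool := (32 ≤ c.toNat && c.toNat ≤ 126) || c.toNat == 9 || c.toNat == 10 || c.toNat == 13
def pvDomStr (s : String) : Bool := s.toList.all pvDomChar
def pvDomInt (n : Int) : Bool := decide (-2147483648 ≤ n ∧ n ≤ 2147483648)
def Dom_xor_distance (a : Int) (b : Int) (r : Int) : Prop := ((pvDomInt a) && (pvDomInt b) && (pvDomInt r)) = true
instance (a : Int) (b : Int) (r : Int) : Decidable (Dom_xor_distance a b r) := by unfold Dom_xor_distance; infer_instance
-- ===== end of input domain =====

-- B computes the loop's "smallest power of two above r" in closed form via bit_length (objective: simpler).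

-- ===== PORT A =====
-- the while-loop `while highest_bit <= r: highest_bit <<= 1`; fuel 64 only makes it total
-- (on Dom, |r| ≤ 2^31 so at most 33 iterations run); `h <<= 1` is exact as `h * 2` (h stays positive).
def pyWhileHB (fuel : Nat) (r : Int) (h : Int) : Int :=
  match fuel with
  | 0 => h
  | n + 1 => if h ≤ r then pyWhileHB n r (h * 2) else h

def xor_distance (a : Int) (b : Int) (r : Int) : Int :=
  let xor_result := PySem.Int.bxor a b
  let highest_bit := pyWhileHB 64 r 1
  if highest_bit ≤ xor_result then PySem.Int.bor xor_result (highest_bit - 1)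
  else PySem.Int.bor xor_result highest_bit

-- ===== PORT B =====
-- `r.bit_length()` for r > 0 is `Nat.log 2 r.toNat + 1` (floor-log plus one)
def xor_distance_alt (a : Int) (b : Int) (r : Int) : Int :=
  let xor_result := PySem.Int.bxor a b
  let highest_bit : Int := if 0 < r then (2 : Int) ^ (Nat.log 2 r.toNat + 1) else 1
  if highest_bit ≤ xor_result then PySem.Int.bor xor_result (highest_bit - 1)
  else PySem.Int.bor xor_result highest_bit

-- ===== PRECONDITION & SPEC =====
def Spec_xor_distance (a : Int) (b : Int) (r : Int) (out : Int) : Prop := out = xor_distance_alt a b r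
instance (a : Int) (b : Int) (r : Int) (out : Int) : Decidable (Spec_xor_distance a b r out) := by unfold Spec_xor_distance; infer_instance

-- ===== CLAIM (what is proved, stated in full; the proofs are below) =====
def Claim_equal_xor_distance : Prop := ∀ (a : Int) (b : Int) (r : Int), Dom_xor_distance a b r → Spec_xor_distance a b r (xor_distance a b r)

-- ===== LEMMAS AND PROOFS =====

-- the loop, started at 2^k with the invariant "either k = 0 or 2^(k-1) ≤ r", returns B's closed form
theorem pyWhileHB_closed (r : Int) (n : Nat) : ∀ (k : Nat), r < 2 ^ (k + n) →
    (k = 0 ∨ (2 : Int) ^ (k - 1) ≤ r) →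
    pyWhileHB n r ((2 : Int) ^ k) = (if 0 < r then (2 : Int) ^ (Nat.log 2 r.toNat + 1) else 1) := by
  induction n with
  | zero =>
    intro k hlt hinv
    simp only [pyWhileHB]
    rw [Nat.add_zero] at hlt
    rcases hinv with h0 | hle
    · subst h0
      simp only [pow_zero] at hlt ⊢
      have : ¬ 0 < r := by omega
      simp [this]
    · have hk : k ≠ 0 := by
        rintro rfl
        simp at hle
        omega
      have hrpos : 0 < r := lt_of_lt_of_le (by positivity) hle
      simp only [hrpos, if_pos]
      -- transfer to Nat and compute the log
      have hr : (r.toNat : Int) = r := Int.toNat_of_nonneg hrpos.le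
      have hle' : 2 ^ (k - 1) ≤ r.toNat := by
        have : ((2 : Nat) ^ (k - 1) : Int) ≤ (r.toNat : Int) := by push_cast; rw [hr]; exact_mod_cast hle
        exact_mod_cast this
      have hlt' : r.toNat < 2 ^ k := by
        have : (r.toNat : Int) < ((2 : Nat) ^ k : Int) := by rw [hr]; exact_mod_cast hlt
        exact_mod_cast this
      have hlog : Nat.log 2 r.toNat = k - 1 := by
        apply Nat.log_eq_of_pow_le_of_lt_pow hle'
        have : k - 1 + 1 = k := Nat.succ_pred_eq_of_pos (Nat.pos_of_ne_zero hk)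
        rw [this]; exact hlt'
      rw [hlog]
      have : k - 1 + 1 = k := Nat.succ_pred_eq_of_pos (Nat.pos_of_ne_zero hk)
      rw [this]
  | succ n ih =>
    intro k hlt hinv
    simp only [pyWhileHB]
    by_cases hc : (2 : Int) ^ k ≤ r
    · rw [if_pos hc]
      have h2 : (2 : Int) ^ k * 2 = (2 : Int) ^ (k + 1) := by ring
      rw [h2]
      apply ih (k + 1)
      · have : k + 1 + n = k + (n + 1) := by omega
        rw [this]; exact hlt
      · right
        simpa using hc
    · rw [if_neg hc]
      rw [not_le] at hc
      rcases hinv with h0 | hle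
      · subst h0
        simp only [pow_zero] at hc ⊢
        have : ¬ 0 < r := by omega
        simp [this]
      · have hk : k ≠ 0 := by
          rintro rfl
          simp at hle
          simp only [pow_zero] at hc
          omega
        have hrpos : 0 < r := lt_of_lt_of_le (by positivity) hle
        simp only [hrpos, if_pos]
        have hr : (r.toNat : Int) = r := Int.toNat_of_nonneg hrpos.le
        have hle' : 2 ^ (k - 1) ≤ r.toNat := by
          have : ((2 : Nat) ^ (k - 1) : Int) ≤ (r.toNat : Int) := by push_cast; rw [hr]; exact_mod_cast hle
          exact_mod_cast this
        have hlt' : r.toNat < 2 ^ k := by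
          have : (r.toNat : Int) < ((2 : Nat) ^ k : Int) := by rw [hr]; exact_mod_cast hc
          exact_mod_cast this
        have hlog : Nat.log 2 r.toNat = k - 1 := by
          apply Nat.log_eq_of_pow_le_of_lt_pow hle'
          have : k - 1 + 1 = k := Nat.succ_pred_eq_of_pos (Nat.pos_of_ne_zero hk)
          rw [this]; exact hlt'
        rw [hlog]
        have : k - 1 + 1 = k := Nat.succ_pred_eq_of_pos (Nat.pos_of_ne_zero hk)
        rw [this]

-- ===== VERDICT (by name: the statement is the Claim_ definition above) =====
theorem xor_distance_spec : Claim_equal_xor_distance := by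
  intro a b r hdom
  unfold Spec_xor_distance xor_distance xor_distance_alt
  have hr : r < 2 ^ (0 + 64) := by
    have : r ≤ 2147483648 := by
      simp only [Dom_xor_distance, pvDomInt, Bool.and_eq_true, decide_eq_true_eq] at hdom
      exact hdom.2.2
    calc r ≤ 2147483648 := this
      _ < 2 ^ (0 + 64) := by norm_num
  have := pyWhileHB_closed r 64 0 hr (Or.inl rfl)
  simp only [pow_zero] at this
  rw [this]
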